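-- pv_equiv track=rewrite | github.com/rookinc/xalchemy_lab | src/xalchemy_lab/paper/run_sector_trace_exception_probe.py | exception_prediction
-- ===== SOURCE A (Python) =====
-- from collections import defaultdict
--
-- SECTOR_BY_EDGE = {
--     "e00": "A",
--
--     "e01": "O",
--     "e04": "O",
--     "e07": "O",
--
--     "e02": "E1",
--     "e05": "E1",
--     "e08": "E1",
--     "e10": "E1",
--     "e11": "E1",
--     "e12": "E1",
--     "e15": "E1",
--
--     "e03": "E2",
--     "e06": "E2",
--     "e09": "E2",
--     "e13": "E2",
--     "e14": "E2",
--     "e17": "E2",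
--     "e20": "E2",
--     "e23": "E2",
--     "e24": "E2",
--     "e25": "E2",
--
--     "e16": "M+",
--     "e18": "M+",
--     "e19": "M+",
--     "e21": "M+",
--     "e26": "M+",
--
--     "e22": "D",
--     "e27": "D",
--
--     "e28": "X",
--     "e29": "X",
-- }
--
-- def canonical_trace(trace):
--     n = len(trace)
--     rots = []
--     for i in range(n):
--         rots.append(tuple(trace[i:] + trace[:i]))
--     rev = list(reversed(trace))
--     for i in range(n):
--         rots.append(tuple(rev[i:] + rev[:i]))
--     return min(rots)
--
-- EXCEPTION_TRACE = canonical_trace(["M+", "O", "E1", "D"])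
--
-- def exception_prediction(edges):
--     trace = [SECTOR_BY_EDGE.get(e, "?") for e in edges]
--     ctr = defaultdict(int)
--     for s in trace:
--         ctr[s] += 1
--
--     # 1. anchor oddness
--     if ctr["A"] >= 1 and ctr["O"] >= 2:
--         return 1
--
--     # 2. special cancellation exception
--     if canonical_trace(trace) == EXCEPTION_TRACE:
--         return 0
--
--     # 3. distal defect oddness
--     if ctr["D"] >= 1 and (ctr["E1"] >= 1 or ctr["E2"] >= 1):
--         return 1
--
--     # 4. pure distal E2 oddness
--     if ctr["E2"] == 4:
--         return 1
--
--     return 0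
-- ===== SOURCE B (Python) =====
-- SECTOR_BY_EDGE = {
--     "e00": "A",
--     "e01": "O", "e04": "O", "e07": "O",
--     "e02": "E1", "e05": "E1", "e08": "E1", "e10": "E1",
--     "e11": "E1", "e12": "E1", "e15": "E1",
--     "e03": "E2", "e06": "E2", "e09": "E2", "e13": "E2",
--     "e14": "E2", "e17": "E2", "e20": "E2", "e23": "E2",
--     "e24": "E2", "e25": "E2",
--     "e16": "M+", "e18": "M+", "e19": "M+", "e21": "M+", "e26": "M+",
--     "e22": "D", "e27": "D",
--     "e28": "X", "e29": "X",
-- }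
--
-- # Precomputed dihedral orbit (all rotations of the target trace and of its
-- # reverse): membership in this set replaces per-call canonicalization.
-- _T = ["M+", "O", "E1", "D"]
-- EXCEPTION_VARIANTS = {tuple(v[i:] + v[:i]) for v in (_T, _T[::-1]) for i in range(4)}
--
-- def exception_prediction(edges):
--     trace = [SECTOR_BY_EDGE.get(e, "?") for e in edges]
--
--     # 1. anchor oddness
--     if "A" in trace and trace.count("O") >= 2:
--         return 1
--
--     # 2. special cancellation exception (orbit membership, no canonicalization)
--     if tuple(trace) in EXCEPTION_VARIANTS:
--         return 0
--
--     # 3. distal defect oddness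
--     if "D" in trace and ("E1" in trace or "E2" in trace):
--         return 1
--
--     # 4. pure distal E2 oddness
--     if trace.count("E2") == 4:
--         return 1
--
--     return 0
-- ===== Notes on version B (the rewrite author's own statement) =====
-- stated objective: faster
-- what changed: Rule 2 tests membership of the trace in the precomputed 8-element dihedral orbit of the exception trace instead of canonicalizing the input by min-over-rotations on every call, and the defaultdict counting loop is replaced by direct 'in'/count tests on the trace; canonical_trace is dropped entirely.
import Mathlib
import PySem

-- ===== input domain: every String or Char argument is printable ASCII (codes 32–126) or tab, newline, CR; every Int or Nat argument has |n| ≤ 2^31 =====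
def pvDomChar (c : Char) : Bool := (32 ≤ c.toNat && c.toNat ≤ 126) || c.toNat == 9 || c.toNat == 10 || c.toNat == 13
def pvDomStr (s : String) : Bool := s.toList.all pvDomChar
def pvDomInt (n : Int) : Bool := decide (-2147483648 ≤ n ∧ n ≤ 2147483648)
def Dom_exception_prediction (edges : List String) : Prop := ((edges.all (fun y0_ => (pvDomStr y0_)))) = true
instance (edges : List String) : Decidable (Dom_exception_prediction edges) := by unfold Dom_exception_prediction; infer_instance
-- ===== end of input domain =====

-- B replaces A's per-call min-over-rotations canonicalization by membership in the
-- precomputed 8-element dihedral orbit of the exception trace, and the defaultdict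
-- counting loop by direct membership/count tests (objective: faster, measured; A rebuilds 2n rotations per call).

-- ===== PORT A =====
def sectorByEdge : PySem.Dict String String := PySem.Dict.ofList [
  ("e00", "A"),
  ("e01", "O"), ("e04", "O"), ("e07", "O"),
  ("e02", "E1"), ("e05", "E1"), ("e08", "E1"), ("e10", "E1"),
  ("e11", "E1"), ("e12", "E1"), ("e15", "E1"),
  ("e03", "E2"), ("e06", "E2"), ("e09", "E2"), ("e13", "E2"),
  ("e14", "E2"), ("e17", "E2"), ("e20", "E2"), ("e23", "E2"),
  ("e24", "E2"), ("e25", "E2"),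
  ("e16", "M+"), ("e18", "M+"), ("e19", "M+"), ("e21", "M+"), ("e26", "M+"),
  ("e22", "D"), ("e27", "D"),
  ("e28", "X"), ("e29", "X")]

-- rots = [tuple(trace[i:] + trace[:i]) for i in range(n)] (for trace, then for its reverse)
def rotsA (t : List String) : List (List String) :=
  (List.range t.length).map (fun i => t.drop i ++ t.take i)

-- min(rots); none exactly where Python's min([]) raises ValueError (empty trace).
-- Python compares the string tuples lexicographically by code points; that order is stated
-- on the character lists (exact), since Lean's own String order is kernel-opaque.
def canonicalA (trace : List String) : Option (List String) :=
  PySem.List.min? (rotsA trace ++ rotsA trace.reverse) (fun x => x.map String.toList)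

def exception_prediction (edges : List String) : Int :=
  let trace := edges.map (fun e => sectorByEdge.getD e "?")
  let ctr := trace.foldl (fun d s => d.modify s 0 (· + 1)) (PySem.Dict.empty : PySem.Dict String Int)
  if 1 ≤ ctr.getD "A" 0 ∧ 2 ≤ ctr.getD "O" 0 then 1
  else if canonicalA trace = canonicalA ["M+", "O", "E1", "D"] then 0
  else if 1 ≤ ctr.getD "D" 0 ∧ (1 ≤ ctr.getD "E1" 0 ∨ 1 ≤ ctr.getD "E2" 0) then 1
  else if ctr.getD "E2" 0 = 4 then 1
  else 0

-- ===== PORT B =====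
-- EXCEPTION_VARIANTS = {tuple(v[i:] + v[:i]) for v in (_T, _T[::-1]) for i in range(4)}
def exceptionVariants : PySem.Set (List String) :=
  PySem.Set.ofList
    (([["M+", "O", "E1", "D"], (["M+", "O", "E1", "D"] : List String).reverse]).flatMap
      (fun v => (List.range 4).map (fun i => v.drop i ++ v.take i)))

def exception_prediction_alt (edges : List String) : Int :=
  let trace := edges.map (fun e => sectorByEdge.getD e "?")
  if "A" ∈ trace ∧ 2 ≤ (trace.count "O" : Int) then 1
  else if PySem.Set.contains exceptionVariants trace then 0
  else if "D" ∈ trace ∧ ("E1" ∈ trace ∨ "E2" ∈ trace) then 1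
  else if (trace.count "E2" : Int) = 4 then 1
  else 0

-- ===== PRECONDITION & SPEC =====
-- Pre_ excludes only the empty edge list, on which Python A raises ValueError (min() of
-- the empty rotation list inside canonical_trace).
def Pre_exception_prediction (edges : List String) : Prop := edges ≠ []
instance (edges : List String) : Decidable (Pre_exception_prediction edges) := by
  unfold Pre_exception_prediction; infer_instance
def pvWitness_exception_prediction : List String := ["e16", "e01", "e02", "e22"]

def Spec_exception_prediction (edges : List String) (out : Int) : Prop :=
  out = exception_prediction_alt edges
instance (edges : List String) (out : Int) : Decidable (Spec_exception_prediction edges out) := by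
  unfold Spec_exception_prediction; infer_instance

-- ===== CLAIM (what is proved, stated in full; the proofs are below) =====
def Claim_equal_exception_prediction : Prop := ∀ (edges : List String),
  Dom_exception_prediction edges → Pre_exception_prediction edges →
  Spec_exception_prediction edges (exception_prediction edges)

-- ===== LEMMAS AND PROOFS =====

-- the counter loop of A is collections.Counter, so getD looks up a plain count
lemma ctr_getD (trace : List String) (v : String) :
    (trace.foldl (fun d s => d.modify s 0 (· + 1)) PySem.Dict.empty).getD v 0 =
      (trace.count v : Int) := by
  rw [← PySem.Dict.counter_eq_foldl, PySem.Dict.getD_counter]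

-- rotations keep the length
lemma length_mem_rotsA (t : List String) (x : List String) (hx : x ∈ rotsA t) :
    x.length = t.length := by
  simp only [rotsA, List.mem_map, List.mem_range] at hx
  obtain ⟨i, hi, rfl⟩ := hx
  simp; omega

-- core: A's canonicalization test coincides with B's orbit-membership test
lemma canon_iff (t : List String) :
    (canonicalA t = canonicalA ["M+", "O", "E1", "D"]) ↔
      PySem.Set.contains exceptionVariants t = true := by
  have hE : canonicalA ["M+", "O", "E1", "D"] = some ["D", "E1", "O", "M+"] := by decide
  have hv : (exceptionVariants : List (List String)) =
      [["M+", "O", "E1", "D"], ["O", "E1", "D", "M+"], ["E1", "D", "M+", "O"],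
       ["D", "M+", "O", "E1"], ["D", "E1", "O", "M+"], ["E1", "O", "M+", "D"],
       ["O", "M+", "D", "E1"], ["M+", "D", "E1", "O"]] := by decide
  rw [hE]
  constructor
  · intro h
    have hmem : (["D", "E1", "O", "M+"] : List String) ∈ rotsA t ++ rotsA t.reverse :=
      PySem.List.min?_mem h
    have hlen : t.length = 4 := by
      rcases List.mem_append.1 hmem with hm | hm
      · have := length_mem_rotsA t _ hm; simpa using this.symm
      · have := length_mem_rotsA t.reverse _ hm; simp at this; omega
    obtain ⟨a, b, c, d, rfl⟩ : ∃ a b c d, t = [a, b, c, d] := by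
      rcases t with _ | ⟨a, _ | ⟨b, _ | ⟨c, _ | ⟨d, _ | ⟨e, t⟩⟩⟩⟩⟩ <;> simp at hlen
      exact ⟨a, b, c, d, rfl⟩
    simp only [rotsA, List.length_cons, List.length_nil, List.reverse_cons,
      List.reverse_nil, List.nil_append, List.cons_append, List.range_succ,
      List.range_zero, List.map_cons, List.map_nil,
      List.mem_cons, List.not_mem_nil, or_false] at hmem
    simp only [PySem.Set.contains, hv]
    rcases hmem with h | h | h | h | h | h | h | h <;>
      · simp only [List.drop, List.take, List.append_nil, List.nil_append,
          List.cons_append, List.cons.injEq, and_true] at h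
        obtain ⟨rfl, rfl, rfl, rfl⟩ := h
        decide
  · intro h
    have ht : t ∈ (exceptionVariants : List (List String)) := by
      simpa [PySem.Set.contains] using h
    rw [hv] at ht
    simp only [List.mem_cons, List.not_mem_nil, or_false] at ht
    rcases ht with rfl | rfl | rfl | rfl | rfl | rfl | rfl | rfl <;> decide

-- ===== VERDICT (by name: the statement is the Claim_ definition above) =====
theorem exception_prediction_spec : Claim_equal_exception_prediction := by
  intro edges _ _
  simp only [Spec_exception_prediction, exception_prediction, exception_prediction_alt,
    ctr_getD]
  have hmem : ∀ v : String,
      (1 ≤ ((edges.map (fun e => sectorByEdge.getD e "?")).count v : Int)) ↔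
        v ∈ edges.map (fun e => sectorByEdge.getD e "?") := by
    intro v; rw [← List.count_pos_iff]; omega
  simp only [hmem, canon_iff]
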